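-- pv_equiv track=rewrite | github.com/marcelbra/academic-budget-bert | dataset/0_helper.py | wwm
-- ===== SOURCE A (Python) =====
-- def wwm(tokens):
--     indices = []
--     current_index = []
--     for i, token in enumerate(tokens):
--         if token == "[CLS]" or token == "[SEP]":
--             continue
--         current_token = tokens[i]
--         next_token = tokens[i+1]
--         current_index.append(i)
--         if (not next_token.startswith("##")
--                 or (current_token.startswith("##")
--                     and not next_token.startswith("##"))
--         ):
--             indices.append(current_index)
--             current_index = []
--     return indices
-- ===== SOURCE B (Python) =====
-- def wwm(tokens):
--     # Outer index walk; each whole word is consumed by an inner loop that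
--     # follows the '##' continuations, so no pending-span accumulator or
--     # flush condition is carried across iterations.
--     spans = []
--     i = 0
--     n = len(tokens)
--     while i < n:
--         if tokens[i] == "[CLS]" or tokens[i] == "[SEP]":
--             i += 1
--             continue
--         span = [i]
--         while tokens[i + 1].startswith("##"):
--             i += 1
--             span.append(i)
--         spans.append(span)
--         i += 1
--     return spans
-- ===== Notes on version B (the rewrite author's own statement) =====
-- stated objective: alternative
-- what changed: Replaces A's flat enumerate loop, which carries a pending current_index list and decides at every token via a (redundant) boolean flush condition whether to emit it, with an outer index walk that consumes each whole word at once through an inner loop following the '##' continuations.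
import Mathlib
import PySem

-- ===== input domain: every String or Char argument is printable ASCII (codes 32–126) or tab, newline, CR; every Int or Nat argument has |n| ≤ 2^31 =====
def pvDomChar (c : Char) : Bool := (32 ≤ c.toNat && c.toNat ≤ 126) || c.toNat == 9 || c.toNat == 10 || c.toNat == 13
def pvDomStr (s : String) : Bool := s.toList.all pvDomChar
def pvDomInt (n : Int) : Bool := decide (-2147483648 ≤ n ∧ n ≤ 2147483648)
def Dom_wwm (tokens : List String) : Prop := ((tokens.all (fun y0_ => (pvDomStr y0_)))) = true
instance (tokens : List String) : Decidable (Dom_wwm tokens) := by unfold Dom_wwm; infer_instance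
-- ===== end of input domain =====

-- B replaces A's flat loop (pending current_index + boolean flush condition)
-- by an outer index walk whose inner loop consumes each word's '##' continuations.

-- ===== PORT A =====
-- A's for-loop over enumerate(tokens), carrying (indices, current_index);
-- 'none' marks the IndexError of tokens[i+1] (excluded by Pre_wwm).
-- The fuel argument (= tokens.length at the call) only makes the recursion
-- structural; the loop itself stops via the 'i < tokens.length' test.
def wwmGo (tokens : List String) : Nat → Nat → List (List Int) → List Int →
    Option (List (List Int))
  | 0, _, indices, _ => some indices
  | fuel + 1, i, indices, current =>
    if h : i < tokens.length then
      let token := tokens[i]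
      if token = "[CLS]" ∨ token = "[SEP]" then
        wwmGo tokens fuel (i + 1) indices current
      else
        match PySem.List.pyGet? tokens ((i : Int) + 1) with
        | none => none
        | some next =>
          let current' := current ++ [(i : Int)]
          if ¬ PySem.Str.startswith next "##" = true ∨
              (PySem.Str.startswith token "##" = true ∧
                ¬ PySem.Str.startswith next "##" = true) then
            wwmGo tokens fuel (i + 1) (indices ++ [current']) []
          else
            wwmGo tokens fuel (i + 1) indices current'
    else
      some indices

def wwm (tokens : List String) : List (List Int) :=
  (wwmGo tokens tokens.length 0 [] []).getD []

-- ===== PORT B =====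
-- the inner "while tokens[i+1].startswith('##')" loop: follows the '##'
-- continuations of the word started at i, returning (span, last index);
-- 'none' is the IndexError of tokens[i+1], fuel (= tokens.length) is only
-- a structural-recursion device and is never exhausted at the call.
def wwmConsume (tokens : List String) : Nat → Nat → List Int →
    Option (List Int × Nat)
  | 0, _, _ => none
  | fuel + 1, i, span =>
    match PySem.List.pyGet? tokens ((i : Int) + 1) with
    | none => none
    | some next =>
      if PySem.Str.startswith next "##" = true then
        wwmConsume tokens fuel (i + 1) (span ++ [((i + 1 : Nat) : Int)])
      else
        some (span, i)

-- the outer "while i < n" loop of B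
def wwmAltGo (tokens : List String) : Nat → Nat → List (List Int) →
    Option (List (List Int))
  | 0, _, spans => some spans
  | fuel + 1, i, spans =>
    if h : i < tokens.length then
      if tokens[i] = "[CLS]" ∨ tokens[i] = "[SEP]" then
        wwmAltGo tokens fuel (i + 1) spans
      else
        match wwmConsume tokens tokens.length i [(i : Int)] with
        | none => none
        | some (span, j) => wwmAltGo tokens fuel (j + 1) (spans ++ [span])
    else
      some spans

def wwm_alt (tokens : List String) : List (List Int) :=
  (wwmAltGo tokens tokens.length 0 []).getD []

-- ===== PRECONDITION & SPEC =====
-- The Pythons' lookahead tokens[i+1] raises IndexError exactly when the last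
-- token is not '[CLS]'/'[SEP]'; Pre_ admits the empty list and lists ending
-- in a special token — precisely the inputs on which A returns.
def Pre_wwm (tokens : List String) : Prop :=
  tokens = [] ∨ tokens.getD (tokens.length - 1) "" = "[CLS]" ∨
    tokens.getD (tokens.length - 1) "" = "[SEP]"
instance (tokens : List String) : Decidable (Pre_wwm tokens) := by
  unfold Pre_wwm; infer_instance

def pvWitness_wwm : List String := ["[CLS]", "un", "##believ", "##able", "fun", "[SEP]"]

def Spec_wwm (tokens : List String) (out : List (List Int)) : Prop := out = wwm_alt tokens
instance (tokens : List String) (out : List (List Int)) : Decidable (Spec_wwm tokens out) := by unfold Spec_wwm; infer_instance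

-- ===== CLAIM (what is proved, stated in full; the proofs are below) =====
def Claim_equal_wwm : Prop := ∀ (tokens : List String), Dom_wwm tokens → Pre_wwm tokens → Spec_wwm tokens (wwm tokens)

-- ===== LEMMAS AND PROOFS =====

theorem hash_not_special {s : String}
    (h : PySem.Str.startswith s "##" = true) :
    ¬ (s = "[CLS]" ∨ s = "[SEP]") := by
  rintro (rfl | rfl) <;> exact absurd h (by decide)

theorem pyGet?_succ_eq (tokens : List String) (i : Nat) :
    PySem.List.pyGet? tokens ((i : Int) + 1) = tokens[i + 1]? := by
  have hcast : ((i : Int) + 1) = ((i + 1 : Nat) : Int) := by push_cast; ring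
  rw [hcast, PySem.List.pyGet?_natCast]

theorem wwmGo_stop (tokens : List String) (fuel i : Nat)
    (indices : List (List Int)) (current : List Int)
    (h : ¬ i < tokens.length) :
    wwmGo tokens fuel i indices current = some indices := by
  cases fuel <;> simp [wwmGo, h]

theorem wwmAltGo_stop (tokens : List String) (fuel i : Nat)
    (spans : List (List Int)) (h : ¬ i < tokens.length) :
    wwmAltGo tokens fuel i spans = some spans := by
  cases fuel <;> simp [wwmAltGo, h]

-- the fuel arguments are inessential once they cover the remaining indices
theorem wwmGo_fuel (tokens : List String) :
    ∀ fuel fuel' i indices current, tokens.length ≤ fuel + i →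
      tokens.length ≤ fuel' + i →
      wwmGo tokens fuel i indices current = wwmGo tokens fuel' i indices current := by
  intro fuel
  induction fuel with
  | zero =>
    intro fuel' i s c h h'
    rw [wwmGo, wwmGo_stop tokens fuel' i s c (by omega)]
  | succ f ih =>
    intro fuel' i s c h h'
    by_cases hi : i < tokens.length
    · obtain ⟨f', rfl⟩ : ∃ g, fuel' = g + 1 := ⟨fuel' - 1, by omega⟩
      rw [wwmGo, wwmGo]
      simp only [hi, dif_pos]
      by_cases hs : tokens[i] = "[CLS]" ∨ tokens[i] = "[SEP]"
      · simp only [hs, if_pos]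
        exact ih f' (i + 1) s c (by omega) (by omega)
      · simp only [hs, if_neg, not_false_eq_true]
        cases hg : PySem.List.pyGet? tokens ((i : Int) + 1) with
        | none => rfl
        | some next =>
          by_cases hn : (¬ PySem.Str.startswith next "##" = true ∨
              (PySem.Str.startswith tokens[i] "##" = true ∧
                ¬ PySem.Str.startswith next "##" = true))
          · simp only [hn, if_pos]
            exact ih f' (i + 1) (s ++ [c ++ [(i : Int)]]) [] (by omega) (by omega)
          · simp only [hn, if_neg, not_false_eq_true]
            exact ih f' (i + 1) s (c ++ [(i : Int)]) (by omega) (by omega)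
    · rw [wwmGo_stop tokens _ i s c hi, wwmGo_stop tokens _ i s c hi]

theorem wwmConsume_fuel (tokens : List String) :
    ∀ fuel fuel' i span, tokens.length ≤ fuel + (i + 1) →
      tokens.length ≤ fuel' + (i + 1) →
      wwmConsume tokens fuel i span = wwmConsume tokens fuel' i span := by
  have hend : ∀ i span, tokens.length ≤ i + 1 → ∀ g,
      wwmConsume tokens g i span = none := by
    intro i span hle g
    have hnone : PySem.List.pyGet? tokens ((i : Int) + 1) = none := by
      rw [pyGet?_succ_eq]; exact List.getElem?_eq_none (by omega)
    cases g <;> simp [wwmConsume, hnone]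
  intro fuel
  induction fuel with
  | zero =>
    intro fuel' i span h h'
    rw [hend i span (by omega) 0, hend i span (by omega) fuel']
  | succ f ih =>
    intro fuel' i span h h'
    by_cases hi : i + 1 < tokens.length
    · obtain ⟨f', rfl⟩ : ∃ g, fuel' = g + 1 := ⟨fuel' - 1, by omega⟩
      rw [wwmConsume, wwmConsume]
      cases hg : PySem.List.pyGet? tokens ((i : Int) + 1) with
      | none => rfl
      | some next =>
        dsimp only
        by_cases hn : PySem.Str.startswith next "##" = true
        · rw [if_pos hn, if_pos hn]
          exact ih f' (i + 1) (span ++ [((i + 1 : Nat) : Int)]) (by omega) (by omega)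
        · rw [if_neg hn, if_neg hn]
    · rw [hend i span (by omega) (f + 1), hend i span (by omega) fuel']

theorem wwmConsume_bounds (tokens : List String) :
    ∀ fuel i span sp j, wwmConsume tokens fuel i span = some (sp, j) →
      i ≤ j ∧ j + 1 < tokens.length := by
  intro fuel
  induction fuel with
  | zero => intro i span sp j h; exact absurd h (by simp [wwmConsume])
  | succ f ih =>
    intro i span sp j h
    rw [wwmConsume] at h
    cases hg : PySem.List.pyGet? tokens ((i : Int) + 1) with
    | none => simp [hg] at h
    | some next =>
      simp only [hg] at h
      by_cases hn : PySem.Str.startswith next "##" = true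
      · rw [if_pos hn] at h
        have := ih (i + 1) (span ++ [((i + 1 : Nat) : Int)]) sp j h
        exact ⟨by omega, this.2⟩
      · rw [if_neg hn] at h
        have hlt : i + 1 < tokens.length := by
          rw [pyGet?_succ_eq] at hg
          exact (List.getElem?_eq_some_iff.mp hg).1
        simp only [Option.some.injEq, Prod.mk.injEq] at h
        obtain ⟨-, rfl⟩ := h
        exact ⟨le_refl i, hlt⟩

-- A's flat loop, from a non-special token, performs exactly one inner
-- consume of B followed by a flush
theorem span_eq (tokens : List String) :
    ∀ fuel i spans current (hi : i < tokens.length),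
      tokens.length ≤ fuel + i + 1 →
      ¬ (tokens[i] = "[CLS]" ∨ tokens[i] = "[SEP]") →
      wwmGo tokens (fuel + 1) i spans current =
        (match wwmConsume tokens (fuel + 1) i (current ++ [(i : Int)]) with
         | none => none
         | some (span, j) =>
           wwmGo tokens (fuel - (j - i)) (j + 1) (spans ++ [span]) []) := by
  intro fuel
  induction fuel with
  | zero =>
    intro i spans current hi hle hs
    -- only the last token remains: the lookahead raises on both sides
    have hnone : PySem.List.pyGet? tokens ((i : Int) + 1) = none := by
      rw [pyGet?_succ_eq]; exact List.getElem?_eq_none (by omega)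
    rw [wwmGo, wwmConsume]
    simp only [hi, dif_pos, hs, if_neg, not_false_eq_true, hnone]
  | succ f ih =>
    intro i spans current hi hle hs
    rw [wwmGo, wwmConsume]
    simp only [hi, dif_pos, hs, if_neg, not_false_eq_true]
    cases hg : PySem.List.pyGet? tokens ((i : Int) + 1) with
    | none => rfl
    | some next =>
      dsimp only
      have hlt : i + 1 < tokens.length := by
        rw [pyGet?_succ_eq] at hg
        exact (List.getElem?_eq_some_iff.mp hg).1
      have hnext : next = tokens[i + 1] := by
        rw [pyGet?_succ_eq] at hg
        exact ((List.getElem?_eq_some_iff.mp hg).2).symm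
      by_cases hn : PySem.Str.startswith next "##" = true
      · -- continuation: A keeps accumulating, B's inner loop advances
        have hA : ¬ (¬ PySem.Str.startswith next "##" = true ∨
            (PySem.Str.startswith tokens[i] "##" = true ∧
              ¬ PySem.Str.startswith next "##" = true)) := by tauto
        rw [if_neg hA, if_pos hn]
        have hs' : ¬ (tokens[i + 1] = "[CLS]" ∨ tokens[i + 1] = "[SEP]") := by
          rw [← hnext]; exact hash_not_special hn
        have hstep := ih (i + 1) spans (current ++ [(i : Int)]) hlt (by omega) hs'
        rw [hstep]
        cases hc : wwmConsume tokens (f + 1) (i + 1)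
            (current ++ [(i : Int)] ++ [((i + 1 : Nat) : Int)]) with
        | none => rfl
        | some sj =>
          obtain ⟨span, j⟩ := sj
          obtain ⟨hij, hjlt⟩ := wwmConsume_bounds tokens (f + 1) (i + 1) _ span j hc
          exact wwmGo_fuel tokens (f - (j - (i + 1))) (f + 1 - (j - i)) (j + 1)
            (spans ++ [span]) [] (by omega) (by omega)
      · -- boundary: A flushes, B's inner loop stops at i
        have hA : (¬ PySem.Str.startswith next "##" = true ∨
            (PySem.Str.startswith tokens[i] "##" = true ∧
              ¬ PySem.Str.startswith next "##" = true)) := by tauto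
        rw [if_pos hA, if_neg hn]
        exact wwmGo_fuel tokens (f + 1) (f + 1 - (i - i)) (i + 1)
          (spans ++ [current ++ [(i : Int)]]) [] (by omega) (by omega)

theorem main_eq (tokens : List String) :
    ∀ k fuelA fuelB i spans, tokens.length - i ≤ k →
      tokens.length ≤ fuelA + i → tokens.length ≤ fuelB + i →
      wwmGo tokens fuelA i spans [] = wwmAltGo tokens fuelB i spans := by
  intro k
  induction k with
  | zero =>
    intro fuelA fuelB i spans hk hA hB
    rw [wwmGo_stop tokens fuelA i spans [] (by omega),
      wwmAltGo_stop tokens fuelB i spans (by omega)]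
  | succ k ih =>
    intro fuelA fuelB i spans hk hA hB
    by_cases hi : i < tokens.length
    · obtain ⟨fA, rfl⟩ : ∃ g, fuelA = g + 1 := ⟨fuelA - 1, by omega⟩
      obtain ⟨fB, rfl⟩ : ∃ g, fuelB = g + 1 := ⟨fuelB - 1, by omega⟩
      by_cases hs : tokens[i] = "[CLS]" ∨ tokens[i] = "[SEP]"
      · rw [wwmGo, wwmAltGo]
        simp only [hi, dif_pos, hs, if_pos]
        exact ih fA fB (i + 1) spans (by omega) (by omega) (by omega)
      · rw [span_eq tokens fA i spans [] hi (by omega) hs, wwmAltGo]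
        simp only [hi, dif_pos, hs, if_neg, not_false_eq_true, List.nil_append]
        rw [wwmConsume_fuel tokens (fA + 1) tokens.length i [(i : Int)]
          (by omega) (by omega)]
        cases hc : wwmConsume tokens tokens.length i [(i : Int)] with
        | none => rfl
        | some sj =>
          obtain ⟨span, j⟩ := sj
          obtain ⟨hij, hjlt⟩ :=
            wwmConsume_bounds tokens tokens.length i _ span j hc
          exact ih (fA - (j - i)) fB (j + 1) (spans ++ [span]) (by omega)
            (by omega) (by omega)
    · rw [wwmGo_stop tokens _ i spans [] hi, wwmAltGo_stop tokens _ i spans hi]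

-- ===== VERDICT (by name: the statement is the Claim_ definition above) =====
theorem wwm_spec : Claim_equal_wwm := by
  intro tokens _ _
  unfold Spec_wwm wwm wwm_alt
  rw [main_eq tokens tokens.length tokens.length tokens.length 0 []
    (by omega) (by omega) (by omega)]
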